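-- pv_equiv track=rewrite | github.com/Carath/Advent-of-Code | 2019/AoC_2019_16.py | nextSequence
-- ===== SOURCE A (Python) =====
-- def partialSum(seq, start, bound):
-- 	s = 0
-- 	for i in range(start, bound):
-- 		s += seq[i]
-- 	return s
--
-- def nextSequence(seq):
-- 	newSeq = []
-- 	for rank in range(1, len(seq) + 1):
-- 		start, s, m = rank - 1, 0, 1
-- 		while start < len(seq):
-- 			bound = min(start + rank, len(seq))
-- 			s += m * partialSum(seq, start, bound)
-- 			start = bound + rank
-- 			m *= -1
-- 		newSeq.append(abs(s) % 10)
-- 	return newSeq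
-- ===== SOURCE B (Python) =====
-- def nextSequence(seq):
--     n = len(seq)
--     prefix = [0]
--     t = 0
--     for x in seq:
--         t += x
--         prefix.append(t)
--     newSeq = []
--     for rank in range(1, n + 1):
--         s, sign = 0, 1
--         for start in range(rank - 1, n, 2 * rank):
--             s += sign * (prefix[min(start + rank, n)] - prefix[start])
--             sign = -sign
--         newSeq.append(abs(s) % 10)
--     return newSeq
-- ===== Notes on version B (the rewrite author's own statement) =====
-- stated objective: faster
-- what changed: Builds a prefix-sum array once so each alternating block sum is two O(1) lookups (stepping starts by 2*rank) instead of rescanning the sequence element by element.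
import Mathlib
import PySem

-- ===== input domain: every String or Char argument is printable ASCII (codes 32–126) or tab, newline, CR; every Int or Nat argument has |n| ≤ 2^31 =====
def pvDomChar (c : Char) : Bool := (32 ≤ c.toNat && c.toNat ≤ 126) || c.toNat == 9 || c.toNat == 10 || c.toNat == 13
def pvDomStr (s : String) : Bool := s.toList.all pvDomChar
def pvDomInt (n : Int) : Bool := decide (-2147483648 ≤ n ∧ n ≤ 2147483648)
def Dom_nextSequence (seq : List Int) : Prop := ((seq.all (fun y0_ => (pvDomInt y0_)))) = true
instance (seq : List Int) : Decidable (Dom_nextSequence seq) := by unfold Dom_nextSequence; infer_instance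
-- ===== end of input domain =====

-- B replaces A's per-block rescans by a prefix-sum array (O(1) block sums); measured asymptotically faster.


-- ===== PORT A =====
def partialSumA (seq : List Int) (start bound : Int) : Int :=
  (PySem.List.pyRange start bound 1).foldl (fun s i => s + PySem.List.pyGetD seq i 0) 0

-- the while-loop of A; the fuel only makes the recursion total (seq.length + 1 always suffices)
def whileA (seq : List Int) (rank : Int) : Nat → Int → Int → Int → Int
  | 0, _, s, _ => s
  | fuel + 1, start, s, m =>
    if start < (seq.length : Int) then
      whileA seq rank fuel (min (start + rank) (seq.length : Int) + rank)
        (s + m * partialSumA seq start (min (start + rank) (seq.length : Int))) (-m)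
    else s

def nextSequence (seq : List Int) : List Int :=
  (PySem.List.pyRange 1 ((seq.length : Int) + 1) 1).foldl
    (fun newSeq rank =>
      newSeq ++ [((whileA seq rank (seq.length + 1) (rank - 1) 0 1).natAbs : Int) % 10]) []

-- ===== PORT B =====
def prefixB (seq : List Int) : List Int :=
  (seq.foldl (fun (st : List Int × Int) x => (st.1 ++ [st.2 + x], st.2 + x)) ([0], 0)).1

def nextSequence_alt (seq : List Int) : List Int :=
  (PySem.List.pyRange 1 ((seq.length : Int) + 1) 1).foldl
    (fun newSeq rank =>
      let st := (PySem.List.pyRange (rank - 1) (seq.length : Int) (2 * rank)).foldl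
        (fun (st : Int × Int) start =>
          (st.1 + st.2 * (PySem.List.pyGetD (prefixB seq) (min (start + rank) (seq.length : Int)) 0
                          - PySem.List.pyGetD (prefixB seq) start 0), -st.2)) (0, 1)
      newSeq ++ [(st.1.natAbs : Int) % 10]) []

-- ===== PRECONDITION & SPEC =====
def Spec_nextSequence (seq : List Int) (out : List Int) : Prop := out = nextSequence_alt seq
instance (seq : List Int) (out : List Int) : Decidable (Spec_nextSequence seq out) := by unfold Spec_nextSequence; infer_instance

-- ===== CLAIM (what is proved, stated in full; the proofs are below) =====
def Claim_equal_nextSequence : Prop := ∀ (seq : List Int), Dom_nextSequence seq → Spec_nextSequence seq (nextSequence seq)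

-- ===== LEMMAS AND PROOFS =====

theorem pyRange_pos_eq_nil {a b s : Int} (hs : 0 < s) (h : b ≤ a) :
    PySem.List.pyRange a b s = [] := by
  rw [PySem.List.pyRange_of_pos a b hs, if_neg (by omega)]
  simp

theorem pyRange_pos_cons {a b s : Int} (hs : 0 < s) (h : a < b) :
    PySem.List.pyRange a b s = a :: PySem.List.pyRange (a + s) b s := by
  rw [PySem.List.pyRange_of_pos a b hs, PySem.List.pyRange_of_pos (a+s) b hs, if_pos h]
  have h1 : (b - a - 1) / s ≥ 0 := Int.ediv_nonneg (by omega) (by omega)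
  have hc : b - a + s - 1 = (b - a - 1) + 1 * s := by ring
  have h2 : (b - a + s - 1) / s = (b - a - 1) / s + 1 := by
    rw [hc, Int.add_mul_ediv_right _ _ (by omega)]
  have h3 : ((b - a + s - 1) / s).toNat = ((b - a - 1) / s).toNat + 1 := by omega
  have h4 : (if a + s < b then ((b - (a + s) + s - 1) / s).toNat else 0) = ((b - a - 1) / s).toNat := by
    split_ifs with hlt
    · congr 1; ring_nf
    · have : 0 ≤ b - a - 1 := by omega
      have : b - a - 1 < s := by omega
      rw [Int.ediv_eq_zero_of_lt (by omega) this]; rfl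
  rw [h3, h4, List.range_succ_eq_map]
  simp only [List.map_cons, List.map_map]
  congr 1
  · simp
  · apply List.map_congr_left
    intro k _
    simp [Function.comp, Nat.succ_eq_add_one]
    ring

theorem psum_aux (seq : List Int) (b : Int) (hb : b ≤ (seq.length : Int)) :
    ∀ (k : Nat) (a : Int), 0 ≤ a → a ≤ b → (b - a).toNat = k → ∀ init : Int,
    (PySem.List.pyRange a b 1).foldl (fun s i => s + PySem.List.pyGetD seq i 0) init
      = init + ((seq.take b.toNat).sum - (seq.take a.toNat).sum) := by
  intro k
  induction k with
  | zero =>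
      intro a h0 hab hk init
      have : a = b := by omega
      subst this
      rw [PySem.List.pyRange_one_eq_nil le_rfl]
      simp
  | succ k ih =>
      intro a h0 hab hk init
      have hlt : a < b := by omega
      rw [PySem.List.pyRange_one_cons hlt, List.foldl_cons]
      rw [ih (a + 1) (by omega) (by omega) (by omega)]
      have hget : PySem.List.pyGetD seq a 0 = seq[a.toNat]'(by omega) :=
        PySem.List.pyGetD_eq_getElem seq 0 h0 (by omega)
      have hsum : (seq.take (a.toNat + 1)).sum = (seq.take a.toNat).sum + seq[a.toNat]'(by omega) :=
        List.sum_take_succ seq a.toNat (by omega)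
      have ht : (a + 1).toNat = a.toNat + 1 := by omega
      rw [hget, ht, hsum]
      ring

theorem partialSumA_eq (seq : List Int) (a b : Int) (h0 : 0 ≤ a) (hab : a ≤ b)
    (hb : b ≤ (seq.length : Int)) :
    partialSumA seq a b = (seq.take b.toNat).sum - (seq.take a.toNat).sum := by
  have := psum_aux seq b hb (b - a).toNat a h0 hab rfl 0
  simpa [partialSumA] using this

theorem prefix_aux (l : List Int) :
    ∀ (acc : List Int) (t : Int),
    (l.foldl (fun (st : List Int × Int) x => (st.1 ++ [st.2 + x], st.2 + x)) (acc, t))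
      = (acc ++ (List.range l.length).map (fun k => t + (l.take (k + 1)).sum), t + l.sum) := by
  induction l with
  | nil => intro acc t; simp
  | cons x xs ih =>
      intro acc t
      rw [List.foldl_cons, ih]
      simp only [Prod.mk.injEq]
      refine ⟨?_, by simp; ring⟩
      rw [List.length_cons, List.range_succ_eq_map, List.map_cons, List.map_map,
          List.append_assoc, List.singleton_append]
      show (acc ++ (t + x) :: List.map (fun k => t + x + (List.take (k + 1) xs).sum) (List.range xs.length)) = _
      congr 1
      refine (List.cons_eq_cons).mpr ⟨by simp, ?_⟩
      apply List.map_congr_left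
      intro k _
      simp only [Function.comp, List.take_succ_cons, List.sum_cons]
      ring

theorem prefixB_eq (seq : List Int) :
    prefixB seq = (List.range (seq.length + 1)).map (fun k => (seq.take k).sum) := by
  unfold prefixB
  rw [prefix_aux]
  rw [List.range_succ_eq_map]
  simp [Function.comp]

theorem prefixB_get (seq : List Int) (i : Int) (h0 : 0 ≤ i) (hi : i ≤ (seq.length : Int)) :
    PySem.List.pyGetD (prefixB seq) i 0 = (seq.take i.toNat).sum := by
  rw [prefixB_eq]
  rw [PySem.List.pyGetD_eq_getElem _ 0 h0 (by simp; omega)]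
  simp

theorem whileA_stop (seq : List Int) (rank : Int) (fuel : Nat) (start s m : Int)
    (h : (seq.length : Int) ≤ start) : whileA seq rank fuel start s m = s := by
  cases fuel <;> simp [whileA, not_lt.mpr h]

theorem loop_eq (seq : List Int) (rank : Int) (hr : 1 ≤ rank) :
    ∀ (fuel : Nat) (start s m : Int), 0 ≤ start → ((seq.length : Int) - start).toNat ≤ fuel →
    whileA seq rank fuel start s m =
      ((PySem.List.pyRange start (seq.length : Int) (2 * rank)).foldl
        (fun (st : Int × Int) i =>
          (st.1 + st.2 * (PySem.List.pyGetD (prefixB seq) (min (i + rank) (seq.length : Int)) 0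
                          - PySem.List.pyGetD (prefixB seq) i 0), -st.2)) (s, m)).1 := by
  intro fuel
  induction fuel with
  | zero =>
      intro start s m h0 hf
      rw [pyRange_pos_eq_nil (by omega) (by omega)]
      simp [whileA]
  | succ fuel ih =>
      intro start s m h0 hf
      by_cases hlt : start < (seq.length : Int)
      · rw [pyRange_pos_cons (by omega) hlt, List.foldl_cons]
        simp only [whileA, if_pos hlt]
        have hb1 : start ≤ min (start + rank) (seq.length : Int) := by omega
        have hb2 : min (start + rank) (seq.length : Int) ≤ (seq.length : Int) := by omega
        have hps : s + m * partialSumA seq start (min (start + rank) (seq.length : Int))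
            = s + m * (PySem.List.pyGetD (prefixB seq) (min (start + rank) (seq.length : Int)) 0
                       - PySem.List.pyGetD (prefixB seq) start 0) := by
          rw [partialSumA_eq seq start _ h0 hb1 hb2, prefixB_get seq _ (by omega) hb2,
              prefixB_get seq start h0 (by omega)]
        rw [hps]
        by_cases hcase : start + rank ≤ (seq.length : Int)
        · have hmin : min (start + rank) (seq.length : Int) = start + rank := min_eq_left hcase
          rw [hmin]
          have : start + rank + rank = start + 2 * rank := by ring
          rw [this]
          exact ih (start + 2 * rank) _ (-m) (by omega) (by omega)
        · have hmin : min (start + rank) (seq.length : Int) = (seq.length : Int) :=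
            min_eq_right (by omega)
          rw [hmin]
          rw [whileA_stop seq rank fuel _ _ _ (by omega)]
          rw [pyRange_pos_eq_nil (by omega) (by omega)]
          rfl
      · rw [pyRange_pos_eq_nil (by omega) (by omega)]
        simp only [whileA, if_neg hlt]
        rfl

theorem foldl_app_congr {α β : Type} (l : List α) (f g : α → List β)
    (h : ∀ x ∈ l, f x = g x) :
    ∀ init : List β, l.foldl (fun a x => a ++ f x) init = l.foldl (fun a x => a ++ g x) init := by
  induction l with
  | nil => intro init; rfl
  | cons x xs ih =>
      intro init
      simp only [List.foldl_cons, h x (by simp)]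
      exact ih (fun y hy => h y (by simp [hy])) _

-- ===== VERDICT (by name: the statement is the Claim_ definition above) =====
theorem nextSequence_spec : Claim_equal_nextSequence := by
  intro seq _
  unfold Spec_nextSequence nextSequence nextSequence_alt
  refine foldl_app_congr _ _ _ ?_ []
  intro rank hmem
  have h := (PySem.List.mem_pyRange_one.mp hmem)
  have hr : 1 ≤ rank := h.1
  have := loop_eq seq rank hr (seq.length + 1) (rank - 1) 0 1 (by omega) (by omega)
  rw [this]
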